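-- pv_equiv track=rewrite | github.com/KostasKv/Minesweeper-with-AI | minesweeper_ai/agents/linear_equations_solver.py | createAdjacentMinesConstraintMatrixOfSample
-- ===== SOURCE A (Python) =====
-- def createAdjacentMinesConstraintMatrixOfSample(frontier, fringe):
--     matrix = []
--
--     # Build up matrix of row equations.
--     for (fringe_x, fringe_y, num_unknown_adjacent_mines) in fringe:
--         matrix_row = []
--
--         # Build equation's left-hand-side of variables
--         for (frontier_x, frontier_y) in frontier:
--             # If frontier tile is adjacent to fringe tile, then it has an effect
--             # on the fringe tile's adjacent mine constraint. Include it in the equation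
--             # by giving it a coefficient of 1, otherwise exclude it with a
--             # coefficient of 0.
--             if abs(frontier_x - fringe_x) <= 1 and abs(frontier_y - fringe_y) <= 1:
--                 matrix_row.append(1)
--             else:
--                 matrix_row.append(0)
--
--         # Append equation's right-hand-side answer/constraint
--         matrix_row.append(num_unknown_adjacent_mines)
--
--         matrix.append(matrix_row)
--
--     return matrix
-- ===== SOURCE B (Python) =====
-- def createAdjacentMinesConstraintMatrixOfSample(frontier, fringe):
--     # Index the frontier once: coordinate -> list of column indices
--     # (a list per coordinate so duplicate frontier positions all get a 1).
--     cols = {}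
--     for i, coord in enumerate(frontier):
--         cols[coord] = cols.get(coord, []) + [i]
--
--     n = len(frontier)
--     matrix = []
--     for fringe_x, fringe_y, num_unknown_adjacent_mines in fringe:
--         row = [0] * n
--         # Only the 9 neighbouring coordinates can contribute a 1.
--         for dx in (-1, 0, 1):
--             for dy in (-1, 0, 1):
--                 for i in cols.get((fringe_x + dx, fringe_y + dy), []):
--                     row[i] = 1
--         row.append(num_unknown_adjacent_mines)
--         matrix.append(row)
--     return matrix
-- ===== Notes on version B (the rewrite author's own statement) =====
-- stated objective: faster
-- what changed: B indexes the frontier once into a dict mapping each coordinate to its list of column indices, then fills each zero row by setting 1s via at most 9 neighbour-coordinate lookups per fringe tile, instead of running the adjacency test against every frontier tile for every fringe tile.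
import Mathlib
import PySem

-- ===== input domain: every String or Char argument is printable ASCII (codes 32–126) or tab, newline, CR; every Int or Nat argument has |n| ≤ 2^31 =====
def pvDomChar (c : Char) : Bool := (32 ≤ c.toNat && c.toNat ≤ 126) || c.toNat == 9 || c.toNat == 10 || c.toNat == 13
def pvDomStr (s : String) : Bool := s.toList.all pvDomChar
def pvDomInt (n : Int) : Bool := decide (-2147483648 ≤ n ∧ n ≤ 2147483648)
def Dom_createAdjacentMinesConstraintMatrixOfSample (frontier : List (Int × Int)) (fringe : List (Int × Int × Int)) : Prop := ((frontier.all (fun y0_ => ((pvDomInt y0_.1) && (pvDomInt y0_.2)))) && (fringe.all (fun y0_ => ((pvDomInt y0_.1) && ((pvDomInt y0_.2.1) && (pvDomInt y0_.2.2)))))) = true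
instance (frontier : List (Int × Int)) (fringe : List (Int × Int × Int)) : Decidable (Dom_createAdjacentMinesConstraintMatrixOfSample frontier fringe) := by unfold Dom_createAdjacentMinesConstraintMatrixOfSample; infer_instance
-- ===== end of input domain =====

-- B indexes the frontier once into a dict (coordinate → column indices) and fills each row
-- by 9 neighbour lookups instead of rescanning the whole frontier per fringe tile (objective: alternative).

-- ===== PORT A =====
def createAdjacentMinesConstraintMatrixOfSample (frontier : List (Int × Int)) (fringe : List (Int × Int × Int)) : List (List Int) :=
  fringe.foldl (fun matrix t =>
    let matrix_row := frontier.foldl (fun r p =>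
      if |p.1 - t.1| ≤ 1 ∧ |p.2 - t.2.1| ≤ 1 then r ++ [(1 : Int)] else r ++ [(0 : Int)]) []
    matrix ++ [matrix_row ++ [t.2.2]]) []

-- ===== PORT B =====
-- cols[coord] = cols.get(coord, []) + [i]  over enumerate(frontier)
def pvCols (frontier : List (Int × Int)) : PySem.Dict (Int × Int) (List Int) :=
  ((PySem.List.enumerate frontier 0).map (fun p => (p.2, p.1))).foldl
    (fun d p => d.modify p.1 [] (· ++ [p.2])) PySem.Dict.empty

-- 'for i in ids: row[i] = 1'
def pvSetOnes (r : List Int) (ids : List Int) : List Int :=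
  ids.foldl (fun r i => r.set i.toNat 1) r

-- the two nested offset loops filling one row
def pvAltRow (cols : PySem.Dict (Int × Int) (List Int)) (n : Nat) (fx fy : Int) : List Int :=
  [(-1 : Int), 0, 1].foldl (fun r dx =>
    [(-1 : Int), 0, 1].foldl (fun r dy =>
      pvSetOnes r (cols.getD (fx + dx, fy + dy) [])) r) (List.replicate n (0 : Int))

def createAdjacentMinesConstraintMatrixOfSample_alt (frontier : List (Int × Int)) (fringe : List (Int × Int × Int)) : List (List Int) :=
  let cols := pvCols frontier
  fringe.foldl (fun matrix t =>
    matrix ++ [pvAltRow cols frontier.length t.1 t.2.1 ++ [t.2.2]]) []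

-- ===== PRECONDITION & SPEC =====
def Spec_createAdjacentMinesConstraintMatrixOfSample (frontier : List (Int × Int)) (fringe : List (Int × Int × Int)) (out : List (List Int)) : Prop := out = createAdjacentMinesConstraintMatrixOfSample_alt frontier fringe
instance (frontier : List (Int × Int)) (fringe : List (Int × Int × Int)) (out : List (List Int)) : Decidable (Spec_createAdjacentMinesConstraintMatrixOfSample frontier fringe out) := by unfold Spec_createAdjacentMinesConstraintMatrixOfSample; infer_instance

-- ===== CLAIM (what is proved, stated in full; the proofs are below) =====
def Claim_equal_createAdjacentMinesConstraintMatrixOfSample : Prop := ∀ (frontier : List (Int × Int)) (fringe : List (Int × Int × Int)), Dom_createAdjacentMinesConstraintMatrixOfSample frontier fringe → Spec_createAdjacentMinesConstraintMatrixOfSample frontier fringe (createAdjacentMinesConstraintMatrixOfSample frontier fringe)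

-- ===== LEMMAS AND PROOFS =====

theorem pvSetOnes_length (ids : List Int) (r : List Int) : (pvSetOnes r ids).length = r.length := by
  induction ids generalizing r with
  | nil => rfl
  | cons a t ih => simp [pvSetOnes, List.foldl_cons] at ih ⊢; rw [ih]; simp

theorem pvSetOnes_pvSetOnes (r a b) : pvSetOnes (pvSetOnes r a) b = pvSetOnes r (a ++ b) := by
  simp [pvSetOnes, List.foldl_append]

theorem pvSetOnes_getElem? (ids : List Int) (r : List Int) (j : Nat)
    (h0 : ∀ i ∈ ids, 0 ≤ i) (hj : j < r.length) :
    (pvSetOnes r ids)[j]? = if (j : Int) ∈ ids then some 1 else r[j]? := by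
  induction ids generalizing r with
  | nil => simp [pvSetOnes]
  | cons a t ih =>
    have ha : 0 ≤ a := h0 a (by simp)
    have : pvSetOnes r (a :: t) = pvSetOnes (r.set a.toNat 1) t := by
      simp [pvSetOnes, List.foldl_cons]
    rw [this, ih _ (fun i hi => h0 i (by simp [hi])) (by simpa using hj)]
    by_cases hm : (j : Int) ∈ t
    · simp [hm]
    · by_cases hja : (j : Int) = a
      · have : a.toNat = j := by omega
        simp [hja, this, hj]
      · have : a.toNat ≠ j := by omega
        simp [hm, hja, List.getElem?_set_ne this]

theorem pvCols_getD (frontier : List (Int × Int)) (c : Int × Int) :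
    (pvCols frontier).getD c [] =
      ((PySem.List.enumerate frontier 0).filter (fun p => p.2 == c)).map (·.1) := by
  unfold pvCols
  rw [PySem.Dict.getD_foldl_modify_append]
  simp [List.filter_map, List.map_map, Function.comp_def, PySem.Dict.getD_empty]

theorem pvCols_nonneg (frontier : List (Int × Int)) (c : Int × Int) :
    ∀ i ∈ (pvCols frontier).getD c [], 0 ≤ i := by
  intro i hi
  rw [pvCols_getD] at hi
  obtain ⟨p, hp, rfl⟩ := List.mem_map.mp hi
  obtain ⟨k, hk, rfl⟩ := by
    simpa [PySem.List.mem_enumerate_iff] using (List.mem_filter.mp hp).1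
  simp

theorem pvCols_mem (frontier : List (Int × Int)) (c : Int × Int) (j : Nat) :
    (j : Int) ∈ (pvCols frontier).getD c [] ↔ ∃ h : j < frontier.length, frontier[j] = c := by
  rw [pvCols_getD]
  constructor
  · intro hi
    obtain ⟨p, hp, hfst⟩ := List.mem_map.mp hi
    obtain ⟨hmem, hc⟩ := List.mem_filter.mp hp
    obtain ⟨k, hk, rfl⟩ := by simpa [PySem.List.mem_enumerate_iff] using hmem
    have hkj : k = j := by simpa using hfst
    subst hkj
    exact ⟨hk, by simpa using hc⟩
  · rintro ⟨h, hc⟩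
    refine List.mem_map.mpr ⟨((j : Int), frontier[j]), List.mem_filter.mpr ⟨?_, by simpa using hc⟩, rfl⟩
    simp only [PySem.List.mem_enumerate_iff]
    exact ⟨j, h, by simp⟩

theorem pvAltRow_eq_map (frontier : List (Int × Int)) (fx fy : Int) :
    pvAltRow (pvCols frontier) frontier.length fx fy =
      frontier.map (fun p => if |p.1 - fx| ≤ 1 ∧ |p.2 - fy| ≤ 1 then (1 : Int) else 0) := by
  set cols := pvCols frontier with hcols
  have hun : pvAltRow cols frontier.length fx fy =
      pvSetOnes (List.replicate frontier.length (0 : Int))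
        (cols.getD (fx + -1, fy + -1) [] ++ (cols.getD (fx + -1, fy + 0) [] ++
         (cols.getD (fx + -1, fy + 1) [] ++ (cols.getD (fx + 0, fy + -1) [] ++
         (cols.getD (fx + 0, fy + 0) [] ++ (cols.getD (fx + 0, fy + 1) [] ++
         (cols.getD (fx + 1, fy + -1) [] ++ (cols.getD (fx + 1, fy + 0) [] ++
          cols.getD (fx + 1, fy + 1) [])))))))) := by
    simp [pvAltRow, List.foldl_cons, pvSetOnes_pvSetOnes]
  rw [hun]
  apply List.ext_getElem?
  intro j
  by_cases hj : j < frontier.length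
  · have hmem9 : ∀ c : Int × Int, ((j : Int) ∈ cols.getD c []) ↔ frontier[j] = c := by
      intro c
      rw [hcols, pvCols_mem]
      constructor
      · rintro ⟨_, h⟩; exact h
      · intro h; exact ⟨hj, h⟩
    rw [pvSetOnes_getElem? _ _ j ?nonneg (by simpa using hj)]
    case nonneg =>
      intro i hi
      simp only [List.mem_append] at hi
      rcases hi with h|h|h|h|h|h|h|h|h <;> exact pvCols_nonneg frontier _ _ h
    have hmap : (frontier.map (fun p => if |p.1 - fx| ≤ 1 ∧ |p.2 - fy| ≤ 1 then (1 : Int) else 0))[j]? =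
        some (if |frontier[j].1 - fx| ≤ 1 ∧ |frontier[j].2 - fy| ≤ 1 then (1 : Int) else 0) := by
      simp [List.getElem?_map, List.getElem?_eq_getElem hj]
    rw [hmap]
    have hiff : ((j : Int) ∈ cols.getD (fx + -1, fy + -1) [] ++ (cols.getD (fx + -1, fy + 0) [] ++
         (cols.getD (fx + -1, fy + 1) [] ++ (cols.getD (fx + 0, fy + -1) [] ++
         (cols.getD (fx + 0, fy + 0) [] ++ (cols.getD (fx + 0, fy + 1) [] ++
         (cols.getD (fx + 1, fy + -1) [] ++ (cols.getD (fx + 1, fy + 0) [] ++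
          cols.getD (fx + 1, fy + 1) [])))))))) ↔
        (|frontier[j].1 - fx| ≤ 1 ∧ |frontier[j].2 - fy| ≤ 1) := by
      simp only [List.mem_append, hmem9, Prod.ext_iff, abs_le]
      omega
    by_cases hcond : |frontier[j].1 - fx| ≤ 1 ∧ |frontier[j].2 - fy| ≤ 1
    · rw [if_pos (hiff.mpr hcond), if_pos hcond]
    · rw [if_neg (fun h => hcond (hiff.mp h)), if_neg hcond]
      simp [hj]
  · have hle : frontier.length ≤ j := Nat.le_of_not_lt hj
    rw [List.getElem?_eq_none (by rw [pvSetOnes_length]; simpa using hle),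
        List.getElem?_eq_none (by simpa using hle)]

theorem rowA_eq_map (frontier : List (Int × Int)) (fx fy : Int) :
    frontier.foldl (fun r p =>
      if |p.1 - fx| ≤ 1 ∧ |p.2 - fy| ≤ 1 then r ++ [(1 : Int)] else r ++ [(0 : Int)]) [] =
    frontier.map (fun p => if |p.1 - fx| ≤ 1 ∧ |p.2 - fy| ≤ 1 then (1 : Int) else 0) := by
  have : (fun (r : List Int) (p : Int × Int) =>
      if |p.1 - fx| ≤ 1 ∧ |p.2 - fy| ≤ 1 then r ++ [(1 : Int)] else r ++ [(0 : Int)]) =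
      (fun r p => r ++ [if |p.1 - fx| ≤ 1 ∧ |p.2 - fy| ≤ 1 then (1 : Int) else 0]) := by
    funext r p; split <;> rfl
  rw [this, PySem.List.foldl_append_singleton_eq_map]
  simp

-- ===== VERDICT (by name: the statement is the Claim_ definition above) =====
theorem createAdjacentMinesConstraintMatrixOfSample_spec : Claim_equal_createAdjacentMinesConstraintMatrixOfSample := by
  intro frontier fringe _
  unfold Spec_createAdjacentMinesConstraintMatrixOfSample
  unfold createAdjacentMinesConstraintMatrixOfSample createAdjacentMinesConstraintMatrixOfSample_alt
  simp only [PySem.List.foldl_append_singleton_eq_map]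
  apply List.map_congr_left
  intro t _
  rw [rowA_eq_map, pvAltRow_eq_map]
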